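-- pv_equiv track=rewrite | github.com/bagar0x60/automata-hw | HW2/src/statemachine.py | _delete_whitespaces
-- ===== SOURCE A (Python) =====
-- def _delete_whitespaces(regexp: str) -> str:
--     result = ""
--     i = 0
--     while i < len(regexp):
--         if regexp[i] == '\\':
--             result += regexp[i:i+2]
--             i += 2
--             continue
--         elif regexp[i] in {'\n', ' '}:
--             i += 1
--             continue
--         result += regexp[i]
--         i += 1
--     return result
-- ===== SOURCE B (Python) =====
-- def _delete_whitespaces(regexp: str) -> str:
--     out = []
--     escaped = False
--     for c in regexp:
--         if escaped:
--             out.append(c)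
--             escaped = False
--         elif c == '\\':
--             out.append(c)
--             escaped = True
--         elif c not in ('\n', ' '):
--             out.append(c)
--     return ''.join(out)
-- ===== Notes on version B (the rewrite author's own statement) =====
-- stated objective: faster
-- what changed: Replaced the index-jumping while loop with slicing and repeated string concatenation by a single for-each pass holding a boolean escape-pending state, collecting characters in a list joined once at the end.
import Mathlib
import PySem

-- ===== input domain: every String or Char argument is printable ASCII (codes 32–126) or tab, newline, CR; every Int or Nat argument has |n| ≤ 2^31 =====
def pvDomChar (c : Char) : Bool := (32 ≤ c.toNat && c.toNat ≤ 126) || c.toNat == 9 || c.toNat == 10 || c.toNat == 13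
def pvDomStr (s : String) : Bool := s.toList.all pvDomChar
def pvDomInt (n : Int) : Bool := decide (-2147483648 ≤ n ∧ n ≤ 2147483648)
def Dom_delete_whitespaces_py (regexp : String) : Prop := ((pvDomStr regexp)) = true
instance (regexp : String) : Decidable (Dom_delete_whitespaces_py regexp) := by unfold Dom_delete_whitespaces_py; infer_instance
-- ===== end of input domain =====

-- B changes A's index-jumping while loop (with slicing and string concatenation) into a
-- one-pass escaped-flag state machine fold; same return value, more idiomatic.

-- ===== PORT A =====
-- A's while loop over index i, state `result`; `regexp[i:i+2]` is `take 2` of the rest,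
-- `i += 2` is `drop 1` of the tail. Recursion on the remaining suffix = the same loop.
def pvGoA (acc : List Char) : List Char → List Char
  | [] => acc
  | c :: rest =>
    if c = '\\' then
      pvGoA (acc ++ List.take 2 (c :: rest)) (List.drop 1 rest)
    else if c = '\n' ∨ c = ' ' then
      pvGoA acc rest
    else
      pvGoA (acc ++ [c]) rest
termination_by l => l.length
decreasing_by
  · simp
  · simp
  · simp

def delete_whitespaces_py (regexp : String) : String :=
  String.ofList (pvGoA [] regexp.toList)

-- ===== PORT B =====
-- B's loop body: state (out, escaped), one step per character.
def pvStepB (st : List Char × Bool) (c : Char) : List Char × Bool :=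
  let (out, esc) := st
  if esc then (out ++ [c], false)
  else if c = '\\' then (out ++ [c], true)
  else if c = '\n' ∨ c = ' ' then (out, esc)
  else (out ++ [c], false)

def delete_whitespaces_py_alt (regexp : String) : String :=
  String.ofList (regexp.toList.foldl pvStepB ([], false)).1

-- ===== PRECONDITION & SPEC =====
def Spec_delete_whitespaces_py (regexp : String) (out : String) : Prop := out = delete_whitespaces_py_alt regexp
instance (regexp : String) (out : String) : Decidable (Spec_delete_whitespaces_py regexp out) := by unfold Spec_delete_whitespaces_py; infer_instance

-- ===== CLAIM (what is proved, stated in full; the proofs are below) =====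
def Claim_equal_delete_whitespaces_py : Prop := ∀ (regexp : String), Dom_delete_whitespaces_py regexp → Spec_delete_whitespaces_py regexp (delete_whitespaces_py regexp)

-- ===== LEMMAS AND PROOFS =====
lemma pvMain : ∀ (n : Nat) (l acc : List Char), l.length ≤ n →
    pvGoA acc l = (l.foldl pvStepB (acc, false)).1 := by
  intro n
  induction n with
  | zero =>
    intro l acc h
    have : l = [] := List.eq_nil_of_length_eq_zero (Nat.le_zero.mp h)
    subst this; simp [pvGoA]
  | succ n ih =>
    intro l acc h
    match l with
    | [] => simp [pvGoA]
    | c :: rest =>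
      by_cases hb : c = '\\'
      · subst hb
        match rest with
        | [] => simp [pvGoA, pvStepB]
        | d :: rest' =>
          have hlen : rest'.length ≤ n := by simp at h; omega
          have hA : pvGoA acc ('\\' :: d :: rest') = pvGoA (acc ++ ['\\', d]) rest' := by
            simp [pvGoA]
          have hB : (('\\' :: d :: rest').foldl pvStepB (acc, false)).1
              = (rest'.foldl pvStepB (acc ++ ['\\', d], false)).1 := by
            simp [List.foldl, pvStepB]
          rw [hA, hB, ih rest' _ hlen]
      · have hlen : rest.length ≤ n := by simp at h; omega
        by_cases hw : c = '\n' ∨ c = ' '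
        · have hA : pvGoA acc (c :: rest) = pvGoA acc rest := by
            simp [pvGoA, hb, hw]
          have hB : ((c :: rest).foldl pvStepB (acc, false)).1
              = (rest.foldl pvStepB (acc, false)).1 := by
            simp [List.foldl, pvStepB, hb, hw]
          rw [hA, hB, ih rest _ hlen]
        · have hA : pvGoA acc (c :: rest) = pvGoA (acc ++ [c]) rest := by
            simp [pvGoA, hb, hw]
          have hB : ((c :: rest).foldl pvStepB (acc, false)).1
              = (rest.foldl pvStepB (acc ++ [c], false)).1 := by
            simp [List.foldl, pvStepB, hb, hw]
          rw [hA, hB, ih rest _ hlen]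

-- ===== VERDICT (by name: the statement is the Claim_ definition above) =====
theorem delete_whitespaces_py_spec : Claim_equal_delete_whitespaces_py := by
  intro regexp _
  unfold Spec_delete_whitespaces_py delete_whitespaces_py delete_whitespaces_py_alt
  rw [pvMain regexp.toList.length regexp.toList [] (Nat.le_refl _)]
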